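-- pv_equiv track=rewrite | github.com/harryhazza77/aws-safe-mcp | src/aws_safe_mcp/tools/resource_search.py | _transaction_trace_steps
-- ===== SOURCE A (Python) =====
-- from typing import Any
--
-- def _transaction_trace_steps(resources: list[dict[str, Any]]) -> list[dict[str, Any]]:
--     order = ["apigateway", "eventbridge", "stepfunctions", "lambda", "sqs", "dynamodb", "s3"]
--     by_service: dict[str, list[dict[str, Any]]] = {service: [] for service in order}
--     for item in resources:
--         service = str(item.get("service") or "")
--         if service in by_service:
--             by_service[service].append(item)
--     steps = []
--     for service in order:
--         for item in by_service[service]: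
--             steps.append(
--                 {
--                     "service": service,
--                     "resource": item.get("name") or item.get("arn"),
--                     "check": _transaction_check_for_service(service),
--                 }
--             )
--     return steps
--
-- def _transaction_check_for_service(service: str) -> str:
--     return {
--         "apigateway": "investigate API Gateway route integration and Lambda permission",
--         "eventbridge": "investigate rule delivery and target policy",
--         "stepfunctions": "explain task dependencies and execution failures",
--         "lambda": "inspect Lambda errors, dependencies, network, and invocation proof",
--         "sqs": "check queue delivery, visibility timeout, DLQ, and Lambda mapping",
--         "dynamodb": "inspect table state, streams, and encryption",
--         "s3": "inspect bucket policy, notifications, and encryption",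
--     }.get(service, "inspect resource summary")
-- ===== SOURCE B (Python) =====
-- def _service_of(item) -> str:
--     return str(item.get("service") or "")
--
--
-- def _check_for(service: str) -> str:
--     if service == "apigateway":
--         return "investigate API Gateway route integration and Lambda permission"
--     elif service == "eventbridge":
--         return "investigate rule delivery and target policy"
--     elif service == "stepfunctions":
--         return "explain task dependencies and execution failures"
--     elif service == "lambda":
--         return "inspect Lambda errors, dependencies, network, and invocation proof"
--     elif service == "sqs":
--         return "check queue delivery, visibility timeout, DLQ, and Lambda mapping"
--     elif service == "dynamodb":
--         return "inspect table state, streams, and encryption"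
--     elif service == "s3":
--         return "inspect bucket policy, notifications, and encryption"
--     else:
--         return "inspect resource summary"
--
--
-- def _transaction_trace_steps(resources: list) -> list:
--     # No bucketing dict: recurse over the fixed service order, scanning the
--     # resources for each service in turn (k = 7 fixed passes).
--     def go(services):
--         if not services:
--             return []
--         s = services[0]
--         chk = _check_for(s)
--         here = [
--             {"service": s, "resource": item.get("name") or item.get("arn"), "check": chk}
--             for item in resources
--             if _service_of(item) == s
--         ]
--         return here + go(services[1:])
--
--     return go(["apigateway", "eventbridge", "stepfunctions", "lambda", "sqs", "dynamodb", "s3"])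
-- ===== Notes on version B (the rewrite author's own statement) =====
-- stated objective: alternative
-- what changed: Drops the by_service bucketing dict and the second drain loop entirely: B recurses over the fixed service order and for each service filters the resources directly, concatenating the per-service step lists; the check text comes from an if/elif chain instead of a dict lookup.
import Mathlib
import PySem

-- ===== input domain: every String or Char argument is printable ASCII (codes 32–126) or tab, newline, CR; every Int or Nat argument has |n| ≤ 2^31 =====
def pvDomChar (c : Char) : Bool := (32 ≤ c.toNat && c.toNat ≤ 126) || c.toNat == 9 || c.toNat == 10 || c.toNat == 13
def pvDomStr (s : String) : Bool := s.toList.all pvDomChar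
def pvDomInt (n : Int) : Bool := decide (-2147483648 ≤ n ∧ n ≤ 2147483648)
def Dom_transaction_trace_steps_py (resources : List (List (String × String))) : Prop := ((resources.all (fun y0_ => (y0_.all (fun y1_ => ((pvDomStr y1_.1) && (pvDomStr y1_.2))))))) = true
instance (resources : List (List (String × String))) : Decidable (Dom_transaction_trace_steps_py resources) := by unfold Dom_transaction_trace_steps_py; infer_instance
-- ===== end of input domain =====

-- B drops A's bucket dict + drain loop: it recurses over the fixed service order,
-- filtering resources per service; the check text is an if/elif chain, not a dict (alternative; no speed claim).

-- ===== PORT A =====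
-- item.get(k) on a Python dict ported as first-match lookup in the association list
def pvItemGet (item : List (String × String)) (k : String) : Option String :=
  (PySem.Dict.mk item).get? k

-- str(item.get("service") or "")  — '' and missing both become ''
def pvServiceOf (item : List (String × String)) : String :=
  match pvItemGet item "service" with
  | some s => if s = "" then "" else s
  | none => ""

-- item.get("name") or item.get("arn")
def pvResourceOf (item : List (String × String)) : Option String :=
  match pvItemGet item "name" with
  | some n => if n = "" then pvItemGet item "arn" else some n
  | none => pvItemGet item "arn"

-- _transaction_check_for_service: dict literal .get(service, default)
def pvCheckFor (service : String) : String :=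
  (PySem.Dict.mk
    [("apigateway", "investigate API Gateway route integration and Lambda permission"),
     ("eventbridge", "investigate rule delivery and target policy"),
     ("stepfunctions", "explain task dependencies and execution failures"),
     ("lambda", "inspect Lambda errors, dependencies, network, and invocation proof"),
     ("sqs", "check queue delivery, visibility timeout, DLQ, and Lambda mapping"),
     ("dynamodb", "inspect table state, streams, and encryption"),
     ("s3", "inspect bucket policy, notifications, and encryption")]).getD service
    "inspect resource summary"

-- the step dict literal A builds for (service, item)
def pvMkStep (service : String) (item : List (String × String)) : List (String × Option String) :=
  [("service", some service), ("resource", pvResourceOf item), ("check", some (pvCheckFor service))]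

-- the body of A's filling loop
def pvStepA (d : PySem.Dict String (List (List (String × String)))) (item : List (String × String)) :
    PySem.Dict String (List (List (String × String))) :=
  let service := pvServiceOf item
  if d.contains service then d.modify service [] (fun xs => xs ++ [item]) else d

def pvOrder : List String :=
  ["apigateway", "eventbridge", "stepfunctions", "lambda", "sqs", "dynamodb", "s3"]

def transaction_trace_steps_py (resources : List (List (String × String))) : List (List (String × Option String)) :=
  let by_service0 : PySem.Dict String (List (List (String × String))) :=
    pvOrder.foldl (fun d s => d.insert s []) PySem.Dict.empty
  let by_service := resources.foldl pvStepA by_service0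
  pvOrder.foldl (fun steps service =>
    (by_service.getD service []).foldl (fun steps item => steps ++ [pvMkStep service item]) steps) []

-- ===== PORT B =====
-- item.get(k): first matching key in the association list
def altGet (item : List (String × String)) (k : String) : Option String :=
  (item.find? (fun kv => kv.1 == k)).map (fun kv => kv.2)

-- _service_of: str(item.get("service") or "") — a missing or empty value is ''
def altServiceOf (item : List (String × String)) : String :=
  match altGet item "service" with
  | some s => if s = "" then "" else s
  | none => ""

-- _check_for: the if/elif chain
def altCheckFor (service : String) : String :=
  if service == "apigateway" then "investigate API Gateway route integration and Lambda permission"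
  else if service == "eventbridge" then "investigate rule delivery and target policy"
  else if service == "stepfunctions" then "explain task dependencies and execution failures"
  else if service == "lambda" then "inspect Lambda errors, dependencies, network, and invocation proof"
  else if service == "sqs" then "check queue delivery, visibility timeout, DLQ, and Lambda mapping"
  else if service == "dynamodb" then "inspect table state, streams, and encryption"
  else if service == "s3" then "inspect bucket policy, notifications, and encryption"
  else "inspect resource summary"

-- the comprehension body: one step dict for item under service s with check chk
def altStep (s chk : String) (item : List (String × String)) : List (String × Option String) :=
  [("service", some s),
   ("resource", match altGet item "name" with
                | some n => if n = "" then altGet item "arn" else some n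
                | none => altGet item "arn"),
   ("check", some chk)]

-- go(services): recursion over the remaining services
def altGo (resources : List (List (String × String))) :
    List String → List (List (String × Option String))
  | [] => []
  | s :: rest =>
    (resources.filter (fun item => altServiceOf item == s)).map (altStep s (altCheckFor s))
      ++ altGo resources rest

def transaction_trace_steps_py_alt (resources : List (List (String × String))) : List (List (String × Option String)) :=
  altGo resources ["apigateway", "eventbridge", "stepfunctions", "lambda", "sqs", "dynamodb", "s3"]

-- ===== PRECONDITION & SPEC =====
def Spec_transaction_trace_steps_py (resources : List (List (String × String))) (out : List (List (String × Option String))) : Prop := out = transaction_trace_steps_py_alt resources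
instance (resources : List (List (String × String))) (out : List (List (String × Option String))) : Decidable (Spec_transaction_trace_steps_py resources out) := by unfold Spec_transaction_trace_steps_py; infer_instance

-- ===== CLAIM (what is proved, stated in full; the proofs are below) =====
def Claim_equal_transaction_trace_steps_py : Prop := ∀ (resources : List (List (String × String))), Dom_transaction_trace_steps_py resources → Spec_transaction_trace_steps_py resources (transaction_trace_steps_py resources)

-- ===== LEMMAS AND PROOFS =====

-- the two ports' item.get agree: Dict.mk lookup is first-match, like find?
theorem pv_get_eq (item : List (String × String)) (k : String) :
    pvItemGet item k = altGet item k := by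
  induction item with
  | nil => rfl
  | cons p rest ih =>
    obtain ⟨a, b⟩ := p
    simp only [pvItemGet, altGet, PySem.Dict.get?_mk_cons, List.find?_cons] at *
    by_cases h : a == k
    · simp [h]
    · simp only [h]
      simpa [pvItemGet, altGet] using ih

theorem pv_step_eq (s : String) (hs : s ∈ pvOrder) (item : List (String × String)) :
    pvMkStep s item = altStep s (altCheckFor s) item := by
  have hc : pvCheckFor s = altCheckFor s := by fin_cases hs <;> decide
  simp [pvMkStep, altStep, pvResourceOf, pv_get_eq, hc]

-- A's filling loop: the bucket of any key the dict already contains collects exactly the matching items, in order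
theorem pv_loop_getD (l : List (List (String × String)))
    (d : PySem.Dict String (List (List (String × String)))) (c : String)
    (hc : d.contains c = true) :
    (l.foldl pvStepA d).getD c []
      = d.getD c [] ++ l.filter (fun item => pvServiceOf item == c) := by
  induction l generalizing d with
  | nil => simp
  | cons x xs ih =>
    rw [List.foldl_cons, List.filter_cons]
    by_cases hx : d.contains (pvServiceOf x) = true
    · have hstep : pvStepA d x = d.modify (pvServiceOf x) [] (fun xs => xs ++ [x]) := by
        simp [pvStepA, hx]
      rw [hstep, ih _ (by simp [PySem.Dict.contains_modify, hc])]
      rw [PySem.Dict.getD_modify]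
      by_cases hcs : c = pvServiceOf x
      · simp [hcs, List.append_assoc]
      · have hne : (pvServiceOf x == c) = false := by
          simp; exact fun h => hcs h.symm
        simp [hcs, hne]
    · have hstep : pvStepA d x = d := by
        simp [pvStepA, hx]
      have hne : (pvServiceOf x == c) = false := by
        simp
        intro h; rw [h] at hx; exact hx hc
      rw [hstep, ih _ hc, hne]
      simp

theorem transaction_trace_steps_py_spec : Claim_equal_transaction_trace_steps_py := by
  unfold Claim_equal_transaction_trace_steps_py
  intro resources _
  unfold Spec_transaction_trace_steps_py transaction_trace_steps_py transaction_trace_steps_py_alt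
  show _ = _
  set d0 : PySem.Dict String (List (List (String × String))) :=
    pvOrder.foldl (fun d s => d.insert s []) PySem.Dict.empty with hd0
  have key : ∀ c ∈ pvOrder,
      ((resources.foldl pvStepA d0).getD c [])
        = resources.filter (fun item => pvServiceOf item == c) := by
    intro c hcmem
    have hc : d0.contains c = true := by
      rw [hd0]; fin_cases hcmem <;> decide
    rw [pv_loop_getD _ _ _ hc]
    have h0 : d0.getD c [] = [] := by
      rw [hd0]; fin_cases hcmem <;> decide
    rw [h0]; simp
  -- A's drain loop over any suffix of pvOrder equals B's recursion, given the buckets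
  have main : ∀ (ord : List String), (∀ c ∈ ord, c ∈ pvOrder) →
      ∀ (init : List (List (String × Option String))),
      ord.foldl (fun steps service =>
        (((resources.foldl pvStepA d0).getD service []).foldl
          (fun steps item => steps ++ [pvMkStep service item]) steps)) init
      = init ++ altGo resources ord := by
    intro ord
    induction ord with
    | nil => intro _ init; simp [altGo]
    | cons s ss ih =>
      intro hsub init
      have hs : s ∈ pvOrder := hsub s (List.mem_cons_self ..)
      rw [List.foldl_cons, PySem.List.foldl_append_singleton_eq_map,
        ih (fun c hc => hsub c (List.mem_cons_of_mem _ hc))]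
      rw [key s hs, altGo, List.append_assoc]
      congr 2
      apply List.map_congr_left
      intro it _; exact pv_step_eq s hs it
  have := main pvOrder (fun c hc => hc) []
  simpa [pvOrder] using this
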